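-- pv_equiv track=rewrite | github.com/thrishank007/NeuraX | kg_security/knowledge_graph_manager.py | _generate_correlation_recommendations
-- ===== SOURCE A (Python) =====
-- from typing import Dict, List, Any, Optional, Tuple, Set
--
-- def _generate_correlation_recommendations(insights: List[Dict[str, Any]]) -> List[str]:
--     """Generate recommendations based on correlation insights"""
--     recommendations = []
--
--     for insight in insights:
--         insight_type = insight.get('type')
--         severity = insight.get('severity')
--
--         if insight_type == 'temporal_correlation' and severity == 'medium':
--             recommendations.append("Investigate temporal patterns - feedback issues may be triggering graph anomalies")
--
--         elif insight_type == 'content_correlation':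
--             recommendations.append("Review content quality - similar issues detected in feedback and graph anomalies")
--
--         elif insight_type == 'high_flagging_rate':
--             recommendations.append("High flagging rate detected - consider reviewing system performance and data quality")
--
--         elif insight_type == 'centrality_anomalies':
--             recommendations.append("Multiple centrality anomalies detected - review graph structure and node relationships")
--
--         elif insight_type == 'suspicious_content_pattern':
--             recommendations.append("URGENT: Suspicious content patterns detected - immediate security review recommended")
--
--         elif insight_type == 'low_rating_pattern':
--             recommendations.append("High proportion of low ratings - investigate system accuracy and relevance")
--
--     if not recommendations:
--         recommendations.append("No significant correlations detected - continue monitoring")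
--
--     return recommendations
-- ===== SOURCE B (Python) =====
-- from typing import Dict, List, Any, Optional, Tuple, Set
--
-- _FALLBACK = "No significant correlations detected - continue monitoring"
--
-- # Each rule: (insight type, required severity or None, recommendation text).
-- _RULES = [
--     ('temporal_correlation', 'medium', "Investigate temporal patterns - feedback issues may be triggering graph anomalies"),
--     ('content_correlation', None, "Review content quality - similar issues detected in feedback and graph anomalies"),
--     ('high_flagging_rate', None, "High flagging rate detected - consider reviewing system performance and data quality"),
--     ('centrality_anomalies', None, "Multiple centrality anomalies detected - review graph structure and node relationships"),
--     ('suspicious_content_pattern', None, "URGENT: Suspicious content patterns detected - immediate security review recommended"),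
--     ('low_rating_pattern', None, "High proportion of low ratings - investigate system accuracy and relevance"),
-- ]
--
--
-- def _generate_correlation_recommendations(insights):
--     # Rule-major traversal: one scan of the insights per rule, collecting
--     # (position, message) hits; positions are unique (one rule per type),
--     # so sorting by position restores input order.
--     hits = []
--     for rule_type, req_severity, message in _RULES:
--         for idx, insight in enumerate(insights):
--             if insight.get('type') == rule_type and (req_severity is None or insight.get('severity') == req_severity):
--                 hits.append((idx, message))
--     hits.sort(key=lambda hit: hit[0])
--     return [message for _, message in hits] or [_FALLBACK]
-- ===== Notes on version B (the rewrite author's own statement) =====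
-- stated objective: alternative
-- what changed: Inverted the traversal: instead of dispatching each insight through an if/elif chain in one pass, B scans the insight list once per rule (rule-major), collects (position, message) hits, and sorts the hits by position to restore input order before the same fallback.
import Mathlib
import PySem

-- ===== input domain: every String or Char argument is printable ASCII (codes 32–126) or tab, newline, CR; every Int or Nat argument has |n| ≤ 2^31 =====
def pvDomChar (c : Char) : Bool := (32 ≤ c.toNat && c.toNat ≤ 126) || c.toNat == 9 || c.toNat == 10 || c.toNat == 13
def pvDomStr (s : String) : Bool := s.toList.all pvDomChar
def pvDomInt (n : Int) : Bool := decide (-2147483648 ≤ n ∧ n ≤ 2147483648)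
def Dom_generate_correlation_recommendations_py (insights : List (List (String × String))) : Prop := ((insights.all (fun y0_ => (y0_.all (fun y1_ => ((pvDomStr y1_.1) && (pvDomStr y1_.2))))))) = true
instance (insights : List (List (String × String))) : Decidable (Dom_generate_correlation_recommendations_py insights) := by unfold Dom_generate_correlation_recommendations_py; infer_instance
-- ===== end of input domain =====

-- B inverts the traversal (one scan of the insights per rule collecting (position, message)
-- hits, then a sort of the hits by position) instead of A's single-pass if/elif dispatch;
-- return values are identical.

-- ===== PORT A =====
-- insight.get(k) on the assoc-list dict = first-match lookup = PySem.Dict.get? on Dict.mk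
def pvStepA (acc : List String) (insight : List (String × String)) : List String :=
  let t := (PySem.Dict.mk insight).get? "type"
  let sev := (PySem.Dict.mk insight).get? "severity"
  if t = some "temporal_correlation" ∧ sev = some "medium" then
    acc ++ ["Investigate temporal patterns - feedback issues may be triggering graph anomalies"]
  else if t = some "content_correlation" then
    acc ++ ["Review content quality - similar issues detected in feedback and graph anomalies"]
  else if t = some "high_flagging_rate" then
    acc ++ ["High flagging rate detected - consider reviewing system performance and data quality"]
  else if t = some "centrality_anomalies" then
    acc ++ ["Multiple centrality anomalies detected - review graph structure and node relationships"]
  else if t = some "suspicious_content_pattern" then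
    acc ++ ["URGENT: Suspicious content patterns detected - immediate security review recommended"]
  else if t = some "low_rating_pattern" then
    acc ++ ["High proportion of low ratings - investigate system accuracy and relevance"]
  else acc

def generate_correlation_recommendations_py (insights : List (List (String × String))) : List String :=
  let recommendations := insights.foldl pvStepA []
  if recommendations = [] then
    recommendations ++ ["No significant correlations detected - continue monitoring"]
  else recommendations

-- ===== PORT B =====
-- _RULES: (insight type, required severity or None, recommendation text)
def pvRULES : List (String × Option String × String) :=
  [ ("temporal_correlation", some "medium", "Investigate temporal patterns - feedback issues may be triggering graph anomalies")
  , ("content_correlation", none, "Review content quality - similar issues detected in feedback and graph anomalies")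
  , ("high_flagging_rate", none, "High flagging rate detected - consider reviewing system performance and data quality")
  , ("centrality_anomalies", none, "Multiple centrality anomalies detected - review graph structure and node relationships")
  , ("suspicious_content_pattern", none, "URGENT: Suspicious content patterns detected - immediate security review recommended")
  , ("low_rating_pattern", none, "High proportion of low ratings - investigate system accuracy and relevance") ]

-- the inner "if insight.get('type') == rule_type and (req_severity is None or …)" test of Source B
def pvRuleHit (rule : String × Option String × String) (p : Int × List (String × String)) : Bool :=
  (PySem.Dict.mk p.2).get? "type" == some rule.1 &&
    (rule.2.1 == none || (PySem.Dict.mk p.2).get? "severity" == rule.2.1)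

def generate_correlation_recommendations_py_alt (insights : List (List (String × String))) : List String :=
  let hits := pvRULES.foldl (fun hits rule =>
    (PySem.List.enumerate insights).foldl (fun hits p =>
      if pvRuleHit rule p then hits ++ [(p.1, rule.2.2)] else hits) hits) []
  let hits := PySem.List.sorted hits (fun hit => hit.1) false
  let out := hits.map (fun hit => hit.2)
  if out = [] then ["No significant correlations detected - continue monitoring"] else out

-- ===== PRECONDITION & SPEC =====
def Spec_generate_correlation_recommendations_py (insights : List (List (String × String))) (out : List String) : Prop := out = generate_correlation_recommendations_py_alt insights
instance (insights : List (List (String × String))) (out : List String) : Decidable (Spec_generate_correlation_recommendations_py insights out) := by unfold Spec_generate_correlation_recommendations_py; infer_instance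

-- ===== CLAIM (what is proved, stated in full; the proofs are below) =====
def Claim_equal_generate_correlation_recommendations_py : Prop := ∀ (insights : List (List (String × String))), Dom_generate_correlation_recommendations_py insights → Spec_generate_correlation_recommendations_py insights (generate_correlation_recommendations_py insights)

-- ===== LEMMAS AND PROOFS =====

-- the single recommendation an insight produces (proof-side characterisation of both ports)
def pvRecFor (insight : List (String × String)) : Option String :=
  if (PySem.Dict.mk insight).get? "type" = some "temporal_correlation" ∧ (PySem.Dict.mk insight).get? "severity" = some "medium" then
    some "Investigate temporal patterns - feedback issues may be triggering graph anomalies"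
  else if (PySem.Dict.mk insight).get? "type" = some "content_correlation" then
    some "Review content quality - similar issues detected in feedback and graph anomalies"
  else if (PySem.Dict.mk insight).get? "type" = some "high_flagging_rate" then
    some "High flagging rate detected - consider reviewing system performance and data quality"
  else if (PySem.Dict.mk insight).get? "type" = some "centrality_anomalies" then
    some "Multiple centrality anomalies detected - review graph structure and node relationships"
  else if (PySem.Dict.mk insight).get? "type" = some "suspicious_content_pattern" then
    some "URGENT: Suspicious content patterns detected - immediate security review recommended"
  else if (PySem.Dict.mk insight).get? "type" = some "low_rating_pattern" then
    some "High proportion of low ratings - investigate system accuracy and relevance"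
  else none

def pvHitOf (p : Int × List (String × String)) : Option (Int × String) :=
  (pvRecFor p.2).map (fun m => (p.1, m))

-- ---- A side: the foldl accumulates exactly the filterMap of pvRecFor ----
theorem pvStepA_eq_toList (acc : List String) (i : List (String × String)) :
    pvStepA acc i = acc ++ (pvRecFor i).toList := by
  simp only [pvStepA, pvRecFor]
  split_ifs <;> simp

theorem foldl_stepA (insights : List (List (String × String))) (acc : List String) :
    insights.foldl pvStepA acc = acc ++ insights.filterMap pvRecFor := by
  induction insights generalizing acc with
  | nil => simp
  | cons i rest ih =>
    simp only [List.foldl_cons, List.filterMap_cons, ih, pvStepA_eq_toList]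
    cases pvRecFor i <;> simp

-- ---- generic: flatMap of appends is a permutation of the appended flatMaps ----
theorem flatMap_append_perm {α β : Type} (rs : List α) (p q : α → List β) :
    (rs.flatMap fun r => p r ++ q r).Perm (rs.flatMap p ++ rs.flatMap q) := by
  induction rs with
  | nil => simp
  | cons a rs ih =>
    simp only [List.flatMap_cons, List.append_assoc]
    refine List.Perm.append_left (p a) ?_
    refine (ih.append_left (q a)).trans ?_
    have h3 : ((q a ++ rs.flatMap p) ++ rs.flatMap q).Perm
        ((rs.flatMap p ++ q a) ++ rs.flatMap q) :=
      List.perm_append_comm.append_right _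
    simpa [List.append_assoc] using h3

-- ---- the per-element body 'if p x then acc ++ [f x] else acc' as an extend ----
theorem filter_map_eq_flatMap {α β : Type} (l : List α) (p : α → Bool) (f : α → β) :
    (l.filter p).map f = l.flatMap (fun a => if p a then [f a] else []) := by
  induction l with
  | nil => simp
  | cons a l ih => by_cases h : p a <;> simp [h, ih]

-- ---- each insight fires at most one rule, and it is pvRecFor ----
theorem rules_hit_eq (p : Int × List (String × String)) :
    (pvRULES.flatMap fun r => if pvRuleHit r p then [(p.1, r.2.2)] else []) = (pvHitOf p).toList := by
  simp only [pvRULES, List.flatMap_cons, List.flatMap_nil, List.append_nil, pvRuleHit, pvHitOf, pvRecFor]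
  cases ht : (PySem.Dict.mk p.2).get? "type" with
  | none => simp
  | some t =>
    by_cases h1 : t = "temporal_correlation"
    · subst h1
      cases hs : (PySem.Dict.mk p.2).get? "severity" with
      | none => simp
      | some sv => by_cases h0 : sv = "medium" <;> simp [h0]
    · by_cases h2 : t = "content_correlation"
      · subst h2; simp
      · by_cases h3 : t = "high_flagging_rate"
        · subst h3; simp
        · by_cases h4 : t = "centrality_anomalies"
          · subst h4; simp
          · by_cases h5 : t = "suspicious_content_pattern"
            · subst h5; simp
            · by_cases h6 : t = "low_rating_pattern"
              · subst h6; simp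
              · simp [h1, h2, h3, h4, h5, h6]

-- ---- the hit list B builds is a permutation of the enumerate filterMap ----
theorem hits_perm (es : List (Int × List (String × String))) :
    (pvRULES.flatMap fun r => es.flatMap fun p => if pvRuleHit r p then [(p.1, r.2.2)] else []).Perm
      (es.filterMap pvHitOf) := by
  induction es with
  | nil => simp
  | cons e es ih =>
    simp only [List.flatMap_cons, List.filterMap_cons]
    have h1 := flatMap_append_perm pvRULES
      (fun r => if pvRuleHit r e then [(e.1, r.2.2)] else [])
      (fun r => es.flatMap fun p => if pvRuleHit r p then [(p.1, r.2.2)] else [])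
    refine h1.trans ?_
    rw [rules_hit_eq]
    cases h : pvHitOf e with
    | none => simpa using ih
    | some v => exact ih.cons v

-- ---- the filterMap over enumerate is strictly increasing in the index ----
theorem filterMap_pairwise (insights : List (List (String × String))) :
    ((PySem.List.enumerate insights).filterMap pvHitOf).Pairwise (fun a b => a.1 < b.1) := by
  have hpw := PySem.List.pairwise_lt_enumerate insights 0
  rw [List.pairwise_filterMap]
  refine hpw.imp_of_mem ?_
  intro a b _ _ hab x hx y hy
  unfold pvHitOf at hx hy
  cases ha : pvRecFor a.2 <;> cases hb : pvRecFor b.2 <;> simp_all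
  subst hx hy
  exact hab

-- ---- dropping the indices gives the insight-order recommendations ----
theorem map_snd_filterMap (insights : List (List (String × String))) (s : Int) :
    ((PySem.List.enumerate insights s).filterMap pvHitOf).map (fun hit => hit.2)
      = insights.filterMap pvRecFor := by
  induction insights generalizing s with
  | nil => simp [PySem.List.enumerate_nil]
  | cons i rest ih =>
    rw [PySem.List.enumerate_cons, List.filterMap_cons, List.filterMap_cons]
    have hh : pvHitOf (s, i) = (pvRecFor i).map (fun m => (s, m)) := rfl
    rw [hh]
    cases h : pvRecFor i <;> simp [ih]

-- ---- B computes the filterMap of pvRecFor (with the same fallback as A) ----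
theorem alt_eq (insights : List (List (String × String))) :
    generate_correlation_recommendations_py_alt insights =
      if insights.filterMap pvRecFor = [] then
        ["No significant correlations detected - continue monitoring"]
      else insights.filterMap pvRecFor := by
  unfold generate_correlation_recommendations_py_alt
  dsimp only
  have hinner : ∀ (acc : List (Int × String)) (rule : String × Option String × String),
      (PySem.List.enumerate insights).foldl (fun hits p =>
        if pvRuleHit rule p then hits ++ [(p.1, rule.2.2)] else hits) acc
      = acc ++ ((PySem.List.enumerate insights).flatMap
          fun p => if pvRuleHit rule p then [(p.1, rule.2.2)] else []) := by
    intro acc rule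
    rw [PySem.List.foldl_append_if (p := pvRuleHit rule) (f := fun p => (p.1, rule.2.2)),
      filter_map_eq_flatMap]
  have hfold : pvRULES.foldl (fun hits rule =>
      (PySem.List.enumerate insights).foldl (fun hits p =>
        if pvRuleHit rule p then hits ++ [(p.1, rule.2.2)] else hits) hits) []
      = pvRULES.flatMap fun r => (PySem.List.enumerate insights).flatMap
          fun p => if pvRuleHit r p then [(p.1, r.2.2)] else [] := by
    rw [PySem.List.foldl_congr_mem pvRULES _
      (fun hits rule => hits ++
        ((PySem.List.enumerate insights).flatMap
          fun p => if pvRuleHit rule p then [(p.1, rule.2.2)] else [])) []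
      (fun acc rule _ => hinner acc rule)]
    rw [PySem.List.foldl_append_eq_flatMap]
    simp
  rw [hfold]
  have hsorted : PySem.List.sorted
      (pvRULES.flatMap fun r => (PySem.List.enumerate insights).flatMap
        fun p => if pvRuleHit r p then [(p.1, r.2.2)] else [])
      (fun hit => hit.1) false
      = (PySem.List.enumerate insights).filterMap pvHitOf :=
    PySem.List.sorted_eq_of_perm_of_pairwise_lt _ _ (fun hit => hit.1)
      ((hits_perm (PySem.List.enumerate insights)).symm) (filterMap_pairwise insights)
  rw [hsorted, map_snd_filterMap insights 0]

-- ===== VERDICT (by name: the statement is the Claim_ definition above) =====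
theorem generate_correlation_recommendations_py_spec : Claim_equal_generate_correlation_recommendations_py := by
  intro insights _
  unfold Spec_generate_correlation_recommendations_py generate_correlation_recommendations_py
  rw [alt_eq, foldl_stepA, List.nil_append]
  split_ifs <;> simp_all
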